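-- pv_equiv track=rewrite | github.com/wndvlf96/codingTest | 코테/카/queue_ka20_3.py | toleft
-- ===== SOURCE A (Python) =====
-- def toleft(deq):
--     ans = 0
--     while deq:
--         x = deq.pop()
--         if x in deq:
--             ans -= 1
--         else:
--             deq.append(x)
--             break
--     return ans
-- ===== SOURCE B (Python) =====
-- def toleft(deq):
--     # One forward pass marks first occurrences, then a backward count;
--     # finally truncates deq exactly as A does (same in-place effect).
--     seen = set()
--     first = []
--     for x in deq:
--         first.append(x not in seen)
--         seen.add(x)
--     ans = 0
--     i = len(deq) - 1
--     while i >= 0 and not first[i]: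
--         ans -= 1
--         i -= 1
--     del deq[len(deq) + ans:]
--     return ans
-- ===== Notes on version B (the rewrite author's own statement) =====
-- stated objective: alternative
-- what changed: Replaces A's interleaved pop-and-membership-scan loop with one forward pass marking first occurrences via a set, a backward count of trailing non-first-occurrences, and a single truncation of deq; asymptotically O(n) vs A's O(n^2) worst case, but A short-circuits on typical inputs so no speedup was measured.
import Mathlib
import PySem

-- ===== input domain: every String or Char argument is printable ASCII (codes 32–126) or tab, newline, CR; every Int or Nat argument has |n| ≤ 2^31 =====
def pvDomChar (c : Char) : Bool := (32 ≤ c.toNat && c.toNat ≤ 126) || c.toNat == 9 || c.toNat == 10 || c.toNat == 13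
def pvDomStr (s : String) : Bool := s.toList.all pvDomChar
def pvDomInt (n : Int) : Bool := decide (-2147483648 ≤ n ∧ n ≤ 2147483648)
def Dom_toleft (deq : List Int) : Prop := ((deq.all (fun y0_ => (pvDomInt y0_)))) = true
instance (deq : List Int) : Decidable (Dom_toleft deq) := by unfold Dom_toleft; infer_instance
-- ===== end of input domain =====

-- B replaces A's interleaved pop-and-membership loop by a forward first-occurrence
-- pass plus a backward count (alternative algorithm); both mutate deq identically (return value is what is proved).

-- ===== PORT A =====
-- while deq: x = deq.pop(); if x in deq: ans -= 1 else: deq.append(x); break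
def toleftGo (deq : List Int) (ans : Int) : Int :=
  if h : deq = [] then ans
  else
    let x := deq.getLast h
    let ys := deq.dropLast
    if ys.contains x then toleftGo ys (ans - 1) else ans
termination_by deq.length
decreasing_by
  have : deq.length ≠ 0 := fun hl => h (List.eq_nil_of_length_eq_zero hl)
  simp [List.length_dropLast]; omega

def toleft (deq : List Int) : Int := toleftGo deq 0

-- ===== PORT B =====
-- forward pass: first-occurrence flags, maintaining the 'seen' set
def toleftFlags (seen : PySem.Set Int) : List Int → List Bool
  | [] => []
  | x :: xs => (!(PySem.Set.contains seen x)) :: toleftFlags (PySem.Set.add seen x) xs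

-- backward while loop: walk from the end while the flag is false, decrementing ans
def toleftTrail : List Bool → Int
  | false :: r => toleftTrail r - 1
  | _ => 0

def toleft_alt (deq : List Int) : Int :=
  toleftTrail ((toleftFlags PySem.Set.empty deq).reverse)

-- ===== PRECONDITION & SPEC =====
def Spec_toleft (deq : List Int) (out : Int) : Prop := out = toleft_alt deq
instance (deq : List Int) (out : Int) : Decidable (Spec_toleft deq out) := by unfold Spec_toleft; infer_instance

-- ===== CLAIM (what is proved, stated in full; the proofs are below) =====
def Claim_equal_toleft : Prop := ∀ (deq : List Int), Dom_toleft deq → Spec_toleft deq (toleft deq)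

-- ===== LEMMAS AND PROOFS =====

theorem toleftGo_nil (ans : Int) : toleftGo [] ans = ans := by
  rw [toleftGo]; simp

theorem toleftGo_concat (ys : List Int) (x ans : Int) :
    toleftGo (ys ++ [x]) ans = if ys.contains x then toleftGo ys (ans - 1) else ans := by
  rw [toleftGo]
  simp

theorem flags_concat (seen : PySem.Set Int) (ys : List Int) (x : Int) :
    toleftFlags seen (ys ++ [x])
      = toleftFlags seen ys ++ [!(ys.contains x || PySem.Set.contains seen x)] := by
  induction ys generalizing seen with
  | nil => simp only [List.nil_append, toleftFlags, List.contains_nil, Bool.false_or]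
  | cons y ys ih =>
    simp only [List.cons_append, toleftFlags, ih, List.contains_cons, List.cons_append]
    have h : PySem.Set.contains (PySem.Set.add seen y) x = (x == y || PySem.Set.contains seen x) := by
      rw [Bool.eq_iff_iff]
      simp only [PySem.Set.contains_iff, PySem.Set.mem_add, Bool.or_eq_true, beq_iff_eq]
      tauto
    rw [h]
    have h2 : (ys.contains x || (x == y || PySem.Set.contains seen x))
        = ((x == y || ys.contains x) || PySem.Set.contains seen x) := by
      cases x == y <;> cases ys.contains x <;> cases PySem.Set.contains seen x <;> rfl
    rw [h2]

theorem toleftGo_eq_alt (deq : List Int) (ans : Int) :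
    toleftGo deq ans = ans + toleft_alt deq := by
  induction deq using List.reverseRecOn generalizing ans with
  | nil => simp [toleftGo_nil, toleft_alt, toleftFlags, toleftTrail]
  | append_singleton ys x ih =>
    rw [toleftGo_concat]
    have hflags : toleft_alt (ys ++ [x])
        = toleftTrail ((!(ys.contains x)) :: (toleftFlags PySem.Set.empty ys).reverse) := by
      unfold toleft_alt
      rw [flags_concat, List.reverse_append]
      have hempty : PySem.Set.contains (PySem.Set.empty : PySem.Set Int) x = false := rfl
      rw [hempty, Bool.or_false, List.reverse_singleton, List.singleton_append]
    by_cases hc : ys.contains x = true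
    · rw [if_pos hc, ih, hflags, hc]
      show ans - 1 + toleft_alt ys = ans + (toleftTrail _ - 1)
      unfold toleft_alt; omega
    · rw [if_neg hc]
      have : (!ys.contains x) = true := by simp_all
      rw [hflags, this]
      simp [toleftTrail]

-- ===== VERDICT (by name: the statement is the Claim_ definition above) =====
theorem toleft_spec : Claim_equal_toleft := by
  intro deq _
  show toleft deq = toleft_alt deq
  simpa using toleftGo_eq_alt deq 0
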